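-- pv_equiv track=rewrite | github.com/abhishekjha2468/HackerRank-Python | Words Score.py | score_words
-- ===== SOURCE A (Python) =====
-- def score_words(words):
--     score = 0
--     if len(words)<=20:
--         for word in words:
--             num_vowels = 0
--             if len(word)<=20 and word.lower()==word:
--     	        for letter in word:
--     	            if letter in 'aeiouy':
--     	                num_vowels = num_vowels + 1
--     	        if num_vowels % 2 == 0:
--     	            score = score + 2
--     	        elif num_vowels % 2 != 0:
--     	            score = score + 1
--             else: break
--     else: pass
--     return score
-- ===== SOURCE B (Python) =====
-- def score_words(words):
--     if len(words) > 20: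
--         return 0
--     return _score(words)
--
--
-- def _score(ws):
--     if not ws:
--         return 0
--     w = ws[0]
--     if len(w) > 20 or w.lower() != w:
--         return 0
--     return 2 - sum(c in 'aeiouy' for c in w) % 2 + _score(ws[1:])
-- ===== Notes on version B (the rewrite author's own statement) =====
-- stated objective: alternative
-- what changed: Replaces the iterative loop-with-break and if/elif parity branches by a recursion that stops at the first invalid word and scores each word with the closed form 2 - (vowel_count % 2).
import Mathlib
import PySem

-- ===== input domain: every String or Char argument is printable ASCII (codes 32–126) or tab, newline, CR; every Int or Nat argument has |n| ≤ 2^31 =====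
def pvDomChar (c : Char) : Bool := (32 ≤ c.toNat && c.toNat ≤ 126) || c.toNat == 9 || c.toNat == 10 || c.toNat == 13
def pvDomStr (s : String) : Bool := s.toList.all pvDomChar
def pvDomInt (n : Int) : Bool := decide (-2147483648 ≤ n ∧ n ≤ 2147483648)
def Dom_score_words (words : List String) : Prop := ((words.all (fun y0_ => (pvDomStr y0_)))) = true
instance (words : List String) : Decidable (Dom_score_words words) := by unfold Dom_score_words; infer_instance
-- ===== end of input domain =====

-- B: recursion stopping at the first invalid word, scoring each word with the closed form 2 - (vowels % 2);
-- an alternative decomposition of A's loop-with-break and if/elif branches (same cost).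

-- ===== PORT A =====
-- A's inner letter loop: num_vowels accumulator
def pvVowLoopA (w : List Char) : Int :=
  w.foldl (fun n c => if ['a','e','i','o','u','y'].contains c then n + 1 else n) 0

-- A's outer for-loop with break, carrying the running score
def pvLoopA : List String → Int → Int
  | [], score => score
  | w :: ws, score =>
    if PySem.Str.len w ≤ 20 ∧ PySem.Str.lower w = w then
      let nv := pvVowLoopA w.toList
      pvLoopA ws
        (if PySem.Int.mod nv 2 = 0 then score + 2
         else if PySem.Int.mod nv 2 ≠ 0 then score + 1 else score)
    else score

def score_words (words : List String) : Int :=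
  if (words.length : Int) ≤ 20 then pvLoopA words 0 else 0

-- ===== PORT B =====
-- B's helper _score: stops at the first invalid word, closed-form parity score per word
def pvScoreB : List String → Int
  | [] => 0
  | w :: ws =>
    if 20 < PySem.Str.len w ∨ PySem.Str.lower w ≠ w then 0
    else
      (2 - PySem.Int.mod
            ((w.toList.countP (fun c => ['a','e','i','o','u','y'].contains c) : Nat) : Int) 2)
        + pvScoreB ws

def score_words_alt (words : List String) : Int :=
  if 20 < (words.length : Int) then 0 else pvScoreB words

-- ===== PRECONDITION & SPEC =====
def Spec_score_words (words : List String) (out : Int) : Prop := out = score_words_alt words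
instance (words : List String) (out : Int) : Decidable (Spec_score_words words out) := by unfold Spec_score_words; infer_instance

-- ===== CLAIM (what is proved, stated in full; the proofs are below) =====
def Claim_equal_score_words : Prop := ∀ (words : List String), Dom_score_words words → Spec_score_words words (score_words words)

-- ===== LEMMAS AND PROOFS =====
lemma pvVowLoopA_eq (w : List Char) :
    pvVowLoopA w = ((w.countP (fun c => ['a','e','i','o','u','y'].contains c) : Nat) : Int) := by
  have h : ∀ (l : List Char) (acc : Int),
      l.foldl (fun n c => if ['a','e','i','o','u','y'].contains c then n + 1 else n) acc
        = acc + ((l.countP (fun c => ['a','e','i','o','u','y'].contains c) : Nat) : Int) := by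
    intro l
    induction l with
    | nil => simp
    | cons c l ih =>
      intro acc
      rw [List.foldl_cons, ih, List.countP_cons]
      split_ifs <;> push_cast <;> ring
  simpa [pvVowLoopA] using h w 0

lemma pvLoopA_eq (ws : List String) (score : Int) :
    pvLoopA ws score = score + pvScoreB ws := by
  induction ws generalizing score with
  | nil => simp [pvLoopA, pvScoreB]
  | cons w ws ih =>
    by_cases hv : PySem.Str.len w ≤ 20 ∧ PySem.Str.lower w = w
    · have hnv := pvVowLoopA_eq w.toList
      set m : Nat := w.toList.countP (fun c => ['a','e','i','o','u','y'].contains c) with hm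
      have hmod : PySem.Int.mod (m : Int) 2 = ((m % 2 : Nat) : Int) := by
        have := PySem.Int.mod_eq_emod_of_pos (a := (m : Int)) (b := 2) (by norm_num)
        rw [this]
        omega
      have hinv : ¬(20 < PySem.Str.len w ∨ PySem.Str.lower w ≠ w) := by
        rintro (h | h)
        · exact absurd hv.1 (not_le.mpr h)
        · exact h hv.2
      simp only [pvLoopA, pvScoreB, if_pos hv, if_neg hinv, hnv, ← hm, hmod, ih]
      rcases Nat.mod_two_eq_zero_or_one m with h0 | h1
      · simp [h0]; ring
      · simp [h1]; ring
    · have hinv : 20 < PySem.Str.len w ∨ PySem.Str.lower w ≠ w := by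
        rcases not_and_or.mp hv with h | h
        · exact Or.inl (not_le.mp h)
        · exact Or.inr h
      simp only [pvLoopA, pvScoreB, if_neg hv, if_pos hinv]
      ring

-- ===== VERDICT (by name: the statement is the Claim_ definition above) =====
theorem score_words_spec : Claim_equal_score_words := by
  intro words _
  show score_words words = score_words_alt words
  unfold score_words score_words_alt
  by_cases h : (words.length : Int) ≤ 20
  · rw [if_pos h, if_neg (by omega), pvLoopA_eq]; ring
  · rw [if_neg h, if_pos (by omega)]
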